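-- pv_equiv track=rewrite | github.com/bqi1/BlackWatchmen | MissionBot/commands/intros/331-as-6/a5p1.py | resolve_tie
-- ===== SOURCE A (Python) =====
-- def resolve_tie(letters: list, ciphertext: str) -> list:
--     """
--     Given two or more letters in a list, resolve the ordering by analyzing the first occurences of each letter
--     """
--     first_occurences = {} # Map letters to the very first index they appear in ciphertext. For example, if ciphertext is "ABCDABCD," then "B" would map to 1
--     ordering = [] # Return list of ordered letters
--     for letter in letters:
--         first_occurences[letter] = ciphertext.upper().find(letter)
--     while True: # Exhaust dictionary of first_occurences. Delete entries to know we evaluated them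
--         if len(first_occurences) == 0: break
--         min_index = min(first_occurences.values()) # Find the first occuring index. The letter will be appended first to ordering.
--         leftmost_key = [key for key,value in first_occurences.items() if value == min_index][0] # Find the letter corresponding to the first occuring index
--         ordering.append(leftmost_key)
--         del first_occurences[leftmost_key]
--
--     return ordering
-- ===== SOURCE B (Python) =====
-- def resolve_tie(letters: list, ciphertext: str) -> list:
--     """
--     Order the (deduplicated) letters by the first index at which each occurs
--     in the uppercased ciphertext (absent letters get find's -1, so they sort first).
--     """
--     up = ciphertext.upper()
--     seen = []
--     for letter in letters:
--         if letter not in seen: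
--             seen.append(letter)
--     return sorted(seen, key=up.find)
-- ===== Notes on version B (the rewrite author's own statement) =====
-- stated objective: idiomatic
-- what changed: Replaces the dict of first indices plus a repeated min-and-delete selection loop with a one-pass order-preserving dedup followed by a single stable sort keyed on up.find.
import Mathlib
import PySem

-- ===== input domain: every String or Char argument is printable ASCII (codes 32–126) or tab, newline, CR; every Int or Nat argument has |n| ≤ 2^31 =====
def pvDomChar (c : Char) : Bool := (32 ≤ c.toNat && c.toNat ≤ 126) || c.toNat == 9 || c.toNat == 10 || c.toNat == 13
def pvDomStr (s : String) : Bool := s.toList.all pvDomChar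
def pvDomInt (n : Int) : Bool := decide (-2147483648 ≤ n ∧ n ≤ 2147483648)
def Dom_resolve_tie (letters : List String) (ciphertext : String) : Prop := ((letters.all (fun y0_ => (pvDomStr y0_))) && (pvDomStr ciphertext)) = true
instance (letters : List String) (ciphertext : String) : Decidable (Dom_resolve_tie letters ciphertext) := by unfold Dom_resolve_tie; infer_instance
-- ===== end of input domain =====

-- B replaces A's dict-of-first-indices + repeated min-and-delete selection with an
-- order-preserving dedup followed by one stable sort keyed on find (idiomatic, same behaviour).


-- ===== PORT A =====
-- the `while True` selection loop: take the key of a minimal value, delete it, repeat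
def pvALoop (d : PySem.Dict String Int) (acc : List String) : List String :=
  if _h : d.items.length = 0 then acc
  else
    match PySem.List.min? d.values (fun v => v) with
    | none => acc   -- unreachable: the dict is nonempty here (Python's min would raise on [])
    | some min_index =>
      match _hk : (d.items.filter (fun kv => kv.2 == min_index)).head? with
      | none => acc -- unreachable: min_index is the value of some entry ([...][0] in Python)
      | some kv => pvALoop (d.erase kv.1) (acc ++ [kv.1])
termination_by d.items.length
decreasing_by
  have hmem : kv ∈ d.items.filter (fun kv => kv.2 == min_index) := by
    obtain ⟨t, ht⟩ := List.head?_eq_some_iff.mp _hk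
    rw [ht]; simp
  have hin : kv ∈ d.items := (List.mem_filter.mp hmem).1
  simp only [PySem.Dict.erase]
  exact List.length_filter_lt_length_iff_exists.mpr ⟨kv, hin, by simp⟩

def resolve_tie (letters : List String) (ciphertext : String) : List String :=
  let first_occurences := letters.foldl
    (fun d letter => d.insert letter (PySem.Str.find (PySem.Str.upper ciphertext) letter))
    PySem.Dict.empty
  pvALoop first_occurences []

-- ===== PORT B =====
def resolve_tie_alt (letters : List String) (ciphertext : String) : List String :=
  let up := PySem.Str.upper ciphertext
  let seen := letters.foldl (fun s letter => if s.contains letter then s else s ++ [letter]) []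
  PySem.List.sorted seen (fun letter => PySem.Str.find up letter) false

-- ===== PRECONDITION & SPEC =====
def Spec_resolve_tie (letters : List String) (ciphertext : String) (out : List String) : Prop := out = resolve_tie_alt letters ciphertext
instance (letters : List String) (ciphertext : String) (out : List String) : Decidable (Spec_resolve_tie letters ciphertext out) := by unfold Spec_resolve_tie; infer_instance

-- ===== CLAIM (what is proved, stated in full; the proofs are below) =====
def Claim_equal_resolve_tie : Prop := ∀ (letters : List String) (ciphertext : String), Dom_resolve_tie letters ciphertext → Spec_resolve_tie letters ciphertext (resolve_tie letters ciphertext)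

-- ===== LEMMAS AND PROOFS =====

-- the dict entry a letter maps to (its value is a function of the key alone)
def pvEnt (key : String → Int) (l : String) : String × Int := (l, key l)

-- L1: folding A's inserts over `letters`, starting from a dict whose items are S.map (pvEnt key),
-- yields a dict whose items are B's order-preserving dedup-extension of S, mapped by pvEnt key.
theorem pvDictBuild (key : String → Int) (letters : List String) (S : List String) :
    (letters.foldl (fun d letter => d.insert letter (key letter)) (⟨S.map (pvEnt key)⟩ : PySem.Dict String Int)).items
      = (letters.foldl (fun s letter => if s.contains letter then s else s ++ [letter]) S).map (pvEnt key) := by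
  induction letters generalizing S with
  | nil => simp
  | cons l t ih =>
    simp only [List.foldl_cons]
    have hc : (PySem.Dict.mk (S.map (pvEnt key))).contains l = S.contains l := by
      simp only [PySem.Dict.contains, List.any_map]
      have : ((fun p : String × Int => p.1 == l) ∘ pvEnt key) = (fun x => x == l) := by
        funext x; simp [pvEnt, Function.comp]
      rw [this, List.any_beq']
    by_cases h : S.contains l = true
    · have he : (PySem.Dict.mk (S.map (pvEnt key))).insert l (key l) = ⟨S.map (pvEnt key)⟩ := by
        simp only [PySem.Dict.insert, hc, h, if_pos]
        congr 1
        rw [List.map_map]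
        apply List.map_congr_left
        intro x _
        by_cases hx' : x = l <;> simp [pvEnt, Function.comp, hx']
      rw [he, ih, if_pos h]
    · have he : (PySem.Dict.mk (S.map (pvEnt key))).insert l (key l) = ⟨(S ++ [l]).map (pvEnt key)⟩ := by
        rw [PySem.Dict.insert, hc, if_neg h]
        simp [pvEnt]
      rw [he, ih, if_neg h]

-- folding insertions into a list headed by k keeps k in front when nothing sorts before k
theorem pvFoldlInsertCons (before : String → String → Bool) (zs : List String) (k : String)
    (acc : List String) (h : ∀ z ∈ zs, before z k = false) :
    zs.foldl (fun a x => PySem.List.insertBy before x a) (k :: acc)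
      = k :: zs.foldl (fun a x => PySem.List.insertBy before x a) acc := by
  induction zs generalizing acc with
  | nil => rfl
  | cons z t ih =>
    simp only [List.foldl_cons]
    rw [show PySem.List.insertBy before z (k :: acc) = k :: PySem.List.insertBy before z acc by
      simp [PySem.List.insertBy, h z (by simp)]]
    exact ih _ (fun z hz => h z (by simp [hz]))

-- L3: the head of the stable sort is the first element attaining the minimum key
theorem pvSortedConsMin (key : String → Int) (pre post : List String) (k : String)
    (hmin : ∀ y ∈ pre ++ k :: post, key k ≤ key y)
    (hpre : ∀ y ∈ pre, key k < key y) :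
    PySem.List.sorted (pre ++ k :: post) key false
      = k :: PySem.List.sorted (pre ++ post) key false := by
  simp only [PySem.List.sorted, Bool.false_eq_true, if_false]
  rw [List.foldl_append, List.foldl_cons, List.foldl_append]
  have hk : PySem.List.insertBy (fun a b => decide (key a < key b)) k
      (pre.foldl (fun a x => PySem.List.insertBy (fun a b => decide (key a < key b)) x a) [])
      = k :: pre.foldl (fun a x => PySem.List.insertBy (fun a b => decide (key a < key b)) x a) [] := by
    have hmem : ∀ y ∈ pre.foldl (fun a x => PySem.List.insertBy (fun a b => decide (key a < key b)) x a) [], y ∈ pre := by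
      intro y hy
      have : y ∈ PySem.List.sorted pre key false := by
        simpa [PySem.List.sorted] using hy
      exact (PySem.List.mem_sorted _ _ _ _).mp this
    rcases hys : pre.foldl (fun a x => PySem.List.insertBy (fun a b => decide (key a < key b)) x a) [] with _ | ⟨y, t⟩
    · rfl
    · have hy : y ∈ pre := hmem y (by rw [hys]; simp)
      simp [PySem.List.insertBy, hpre y hy]
  rw [hk]
  exact pvFoldlInsertCons _ post k _
    (fun z hz => by simp [not_lt.mpr (hmin z (by simp [hz]))])

-- L2: the selection loop on a dict whose items are S.map (pvEnt key), S without
-- duplicates, appends exactly the stable sort of S by key.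
theorem pvALoopSorted (key : String → Int) (n : Nat) (S : List String) (acc : List String)
    (hnd : S.Nodup) (hlen : S.length = n) :
    pvALoop ⟨S.map (pvEnt key)⟩ acc = acc ++ PySem.List.sorted S key false := by
  induction n using Nat.strong_induction_on generalizing S acc with
  | _ n ih =>
  rcases S with _ | ⟨s0, S'⟩
  · simp [pvALoop, PySem.List.sorted]
  rw [pvALoop]
  rw [dif_neg (by simp)]
  have hvals : (PySem.Dict.mk ((s0 :: S').map (pvEnt key))).values = (s0 :: S').map key := by
    simp [PySem.Dict.values, List.map_map, pvEnt, Function.comp]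
  split
  · -- min? = none : impossible, values nonempty
    rename_i heq
    exfalso
    rw [PySem.List.min?_eq_none_iff, hvals] at heq
    simp at heq
  rename_i m heq
  have hmmem : m ∈ (s0 :: S').map key := by
    have := PySem.List.min?_mem heq; rwa [hvals] at this
  have hmmin : ∀ y ∈ (s0 :: S').map key, m ≤ y := by
    intro y hy
    have := PySem.List.min?_isMin heq
    rw [hvals] at this
    simpa using this y hy
  have hfil : (PySem.Dict.mk ((s0 :: S').map (pvEnt key))).items.filter (fun kv => kv.2 == m)
      = ((s0 :: S').filter (fun l => key l == m)).map (pvEnt key) := by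
    rw [show (PySem.Dict.mk ((s0 :: S').map (pvEnt key))).items = (s0 :: S').map (pvEnt key) from rfl,
        List.filter_map]
    have : ((fun kv : String × Int => kv.2 == m) ∘ pvEnt key) = (fun l => key l == m) := by
      funext x; simp [pvEnt, Function.comp]
    rw [this]
  split
  · -- head? = none : impossible, some entry has value m
    rename_i hk
    exfalso
    obtain ⟨l, hl, hkl⟩ := List.mem_map.mp hmmem
    have hmem : pvEnt key l ∈ (PySem.Dict.mk ((s0 :: S').map (pvEnt key))).items.filter (fun kv => kv.2 == m) := by
      rw [hfil]
      exact List.mem_map_of_mem (List.mem_filter.mpr ⟨hl, by simp [hkl]⟩)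
    rw [List.head?_eq_none_iff.mp hk] at hmem
    simp at hmem
  rename_i kv hk
  -- identify kv with the first letter attaining key = m
  rw [hfil] at hk
  rcases h0 : (s0 :: S').filter (fun l => key l == m) with _ | ⟨l0, rest⟩
  · rw [h0] at hk; simp at hk
  have hkv : kv = pvEnt key l0 := by rw [h0] at hk; simpa using hk.symm
  obtain ⟨pre, post, hS, hprenot, hpl0, -⟩ := List.filter_eq_cons_iff.mp h0
  have hkl0 : key l0 = m := by simpa using hpl0
  -- nodup facts from the decomposition
  rw [hS] at hnd
  rw [List.nodup_append] at hnd
  obtain ⟨hndpre, hndcons, hdisj⟩ := hnd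
  rw [List.nodup_cons] at hndcons
  have hl0pre : l0 ∉ pre := fun h => hdisj l0 h l0 (by simp) rfl
  have hnd' : (pre ++ post).Nodup :=
    List.nodup_append.mpr ⟨hndpre, hndcons.2, fun a ha b hb => hdisj a ha b (List.mem_cons_of_mem _ hb)⟩
  -- erasing kv.1 = l0 leaves exactly (pre ++ post).map (pvEnt key)
  have herase : (PySem.Dict.mk ((s0 :: S').map (pvEnt key))).erase kv.1
      = ⟨(pre ++ post).map (pvEnt key)⟩ := by
    rw [hkv]
    simp only [PySem.Dict.erase, pvEnt]
    congr 1
    rw [List.filter_map (f := pvEnt key)]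
    have : (s0 :: S').filter ((fun p => !(p.1 == l0)) ∘ pvEnt key)
        = pre ++ post := by
      have hfeq : ((fun (p : String × Int) => !(p.1 == l0)) ∘ pvEnt key) = fun l => !(l == l0) := by
        funext l; simp [pvEnt, Function.comp]
      rw [hfeq, hS, List.filter_append, List.filter_cons]
      simp only [beq_self_eq_true, Bool.not_true, Bool.false_eq_true, if_false]
      rw [List.filter_eq_self.mpr (fun x hx => by
            have : x ≠ l0 := fun h => hl0pre (h ▸ hx); simp [this]),
          List.filter_eq_self.mpr (fun x hx => by
            have : x ≠ l0 := fun h => hndcons.1 (h ▸ hx); simp [this])]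
    rw [show pvEnt key = fun l => (l, key l) from rfl] at this ⊢
    rw [this]
  rw [herase, hkv]
  have hlen' : (pre ++ post).length < n := by
    subst hlen; rw [hS]; simp only [List.length_append, List.length_cons]; omega
  rw [ih _ hlen' _ _ hnd' rfl]
  have hsorted : PySem.List.sorted (pre ++ l0 :: post) key false
      = l0 :: PySem.List.sorted (pre ++ post) key false := by
    apply pvSortedConsMin
    · intro y hy
      rw [hkl0]
      exact hmmin _ (List.mem_map_of_mem (hS ▸ hy))
    · intro y hy
      have hle : key l0 ≤ key y := hkl0 ▸ hmmin _ (List.mem_map_of_mem (hS ▸ (by simp [hy])))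
      have hne : key y ≠ m := by simpa using hprenot y hy
      omega
  rw [hS, hsorted]
  simp [pvEnt]

-- ===== VERDICT (by name: the statement is the Claim_ definition above) =====
theorem resolve_tie_spec : Claim_equal_resolve_tie := by
  intro letters ciphertext _
  unfold Spec_resolve_tie resolve_tie resolve_tie_alt
  have h1 := pvDictBuild (fun l => PySem.Str.find (PySem.Str.upper ciphertext) l) letters []
  simp only [List.map_nil] at h1
  have hseen : (letters.foldl (fun s letter => if s.contains letter then s else s ++ [letter]) ([] : List String)).Nodup := by
    have : (letters.foldl (fun s letter => if s.contains letter then s else s ++ [letter]) ([] : List String))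
        = PySem.Set.ofList letters := by
      rw [PySem.Set.ofList_eq_foldl]
      rfl
    rw [this]
    exact PySem.Set.nodup_ofList letters
  have h2 := pvALoopSorted (fun l => PySem.Str.find (PySem.Str.upper ciphertext) l) _ _ ([] : List String) hseen rfl
  have hd : (letters.foldl (fun d letter => d.insert letter (PySem.Str.find (PySem.Str.upper ciphertext) letter)) PySem.Dict.empty)
      = ⟨(letters.foldl (fun s letter => if s.contains letter then s else s ++ [letter]) []).map (pvEnt (fun l => PySem.Str.find (PySem.Str.upper ciphertext) l))⟩ := by
    apply PySem.Dict.ext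
    exact h1
  rw [hd, h2]
  simp
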